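-- pv_equiv track=rewrite | github.com/aaronbarnoff/Collinear | helpers/exhaustive_search/verify_exhaust.py | build_point_maps
-- ===== SOURCE A (Python) =====
-- def build_point_maps(max_n=330):
--     maps = {}
--     for n in range(1, max_n + 1):
--         v = [[0 for _ in range(n)] for _ in range(n)]
--         counter = 0
--         for b in range(n):
--             for x in range(n):
--                 y = b - x
--                 if 0 <= y < n:
--                     counter += 1
--                     v[x][y] = counter
--         inv = {}
--         for x in range(n):
--             for y in range(n):
--                 if v[x][y] > 0:
--                     inv[v[x][y]] = (x, y)
--         maps[n] = inv
--     return maps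
-- ===== SOURCE B (Python) =====
-- def build_point_maps(max_n=330):
--     # Closed-form counter: on anti-diagonal s = x + y (s < n), the counter of
--     # (x, y) is the triangular number of s plus x + 1; cells with s >= n get
--     # no counter.  One triangular pass, no matrix, no inversion pass.
--     maps = {}
--     for n in range(1, max_n + 1):
--         inv = {}
--         for x in range(n):
--             for y in range(n - x):
--                 s = x + y
--                 inv[s * (s + 1) // 2 + x + 1] = (x, y)
--         maps[n] = inv
--     return maps
-- ===== Notes on version B (the rewrite author's own statement) =====
-- stated objective: simpler
-- what changed: Replaces A's decomposition (build an n-by-n matrix with a diagonal-order counter, then rescan the whole matrix to invert it) by a single triangular pass that computes each counter directly as a closed-form triangular number, eliminating the matrix and two of the three quadratic loops.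
import Mathlib
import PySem

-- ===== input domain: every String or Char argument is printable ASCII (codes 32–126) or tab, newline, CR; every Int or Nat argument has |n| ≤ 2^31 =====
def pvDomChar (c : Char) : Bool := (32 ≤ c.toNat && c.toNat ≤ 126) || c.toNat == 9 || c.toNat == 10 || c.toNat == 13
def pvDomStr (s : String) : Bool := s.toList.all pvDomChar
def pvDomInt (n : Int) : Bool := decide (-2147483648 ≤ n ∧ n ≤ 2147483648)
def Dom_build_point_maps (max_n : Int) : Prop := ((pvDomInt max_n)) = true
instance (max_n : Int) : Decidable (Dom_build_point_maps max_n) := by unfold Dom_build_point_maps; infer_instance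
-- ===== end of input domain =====

-- B replaces A's matrix-then-invert decomposition by one triangular pass with a
-- closed-form counter (objective: simpler; same outputs).

-- ===== PORT A =====
-- Literal port of A.  `v[x][y] = counter` / `v[x][y]` use pySetD / pyGetD with a
-- default: exact here because every index A uses is in range (0 ≤ x,y < n).
def build_point_maps (max_n : Int) : List (Int × List (Int × Int × Int)) :=
  ((PySem.List.pyRange 1 (max_n + 1) 1).foldl (fun maps n =>
    let v : List (List Int) :=
      (PySem.List.pyRange 0 n 1).map (fun _ => (PySem.List.pyRange 0 n 1).map (fun _ => (0 : Int)))
    let vc : List (List Int) × Int :=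
      (PySem.List.pyRange 0 n 1).foldl (fun vc b =>
        (PySem.List.pyRange 0 n 1).foldl (fun (vc : List (List Int) × Int) x =>
          let y := b - x
          if 0 ≤ y ∧ y < n then
            let counter := vc.2 + 1
            (PySem.List.pySetD vc.1 x
              (PySem.List.pySetD (PySem.List.pyGetD vc.1 x []) y counter), counter)
          else vc) vc) (v, 0)
    let inv : PySem.Dict Int (Int × Int) :=
      (PySem.List.pyRange 0 n 1).foldl (fun inv x =>
        (PySem.List.pyRange 0 n 1).foldl (fun (inv : PySem.Dict Int (Int × Int)) y =>
          if PySem.List.pyGetD (PySem.List.pyGetD vc.1 x []) y 0 > 0 then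
            inv.insert (PySem.List.pyGetD (PySem.List.pyGetD vc.1 x []) y 0) (x, y)
          else inv) inv) PySem.Dict.empty
    maps.insert n inv.items) (PySem.Dict.empty : PySem.Dict Int (List (Int × Int × Int)))).items

-- ===== PORT B =====
def build_point_maps_alt (max_n : Int) : List (Int × List (Int × Int × Int)) :=
  ((PySem.List.pyRange 1 (max_n + 1) 1).foldl (fun maps n =>
    let inv : PySem.Dict Int (Int × Int) :=
      (PySem.List.pyRange 0 n 1).foldl (fun inv x =>
        (PySem.List.pyRange 0 (n - x) 1).foldl (fun (inv : PySem.Dict Int (Int × Int)) y =>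
          let s := x + y
          inv.insert (PySem.Int.floordiv (s * (s + 1)) 2 + x + 1) (x, y)) inv) PySem.Dict.empty
    maps.insert n inv.items) (PySem.Dict.empty : PySem.Dict Int (List (Int × Int × Int)))).items

-- ===== PRECONDITION & SPEC =====
def Spec_build_point_maps (max_n : Int) (out : List (Int × List (Int × Int × Int))) : Prop := out = build_point_maps_alt max_n
instance (max_n : Int) (out : List (Int × List (Int × Int × Int))) : Decidable (Spec_build_point_maps max_n out) := by unfold Spec_build_point_maps; infer_instance

-- ===== CLAIM (what is proved, stated in full; the proofs are below) =====
def Claim_equal_build_point_maps : Prop := ∀ (max_n : Int), Dom_build_point_maps max_n → Spec_build_point_maps max_n (build_point_maps max_n)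

-- ===== LEMMAS AND PROOFS =====

-- triangular numbers, as A's counter accumulates them
def pvTri : Nat → Int
  | 0 => 0
  | k+1 => pvTri k + (k+1)

lemma pvTri_nonneg (k : Nat) : 0 ≤ pvTri k := by
  induction k with
  | zero => simp [pvTri]
  | succ k ih => simp only [pvTri]; omega

lemma pvTri_floordiv (s : Nat) : pvTri s = PySem.Int.floordiv ((s : Int) * ((s : Int) + 1)) 2 := by
  induction s with
  | zero => decide
  | succ s ih =>
    have h1 : ((s + 1 : Nat) : Int) * (((s + 1 : Nat) : Int) + 1) = (((s + 1) * (s + 2) : Nat) : Int) := by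
      push_cast; ring
    have h2 : ((s : Nat) : Int) * (((s : Nat) : Int) + 1) = (((s * (s + 1) : Nat)) : Int) := by
      push_cast; ring
    rw [pvTri, ih, h1, h2]
    rw [show (2 : Int) = ((2 : Nat) : Int) from rfl, PySem.Int.floordiv_natCast,
      PySem.Int.floordiv_natCast]
    have h3 : (s + 1) * (s + 2) = s * (s + 1) + 2 * (s + 1) := by ring
    have h4 : s * (s + 1) / 2 + (s + 1) = (s + 1) * (s + 2) / 2 := by omega
    exact_mod_cast h4

-- v[x][y] as A reads it
def pvGetC (M : List (List Int)) (x y : Int) : Int :=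
  PySem.List.pyGetD (PySem.List.pyGetD M x []) y 0

def pvShape (M : List (List Int)) (N : Nat) : Prop :=
  M.length = N ∧ ∀ row ∈ M, row.length = N

-- A's initial matrix and loop bodies, named for the proofs (definitionally the port's)
def pvV0 (n : Int) : List (List Int) :=
  (PySem.List.pyRange 0 n 1).map (fun _ => (PySem.List.pyRange 0 n 1).map (fun _ => (0 : Int)))

def pvCell (n b : Int) (vc : List (List Int) × Int) (x : Int) : List (List Int) × Int :=
  let y := b - x
  if 0 ≤ y ∧ y < n then
    let counter := vc.2 + 1
    (PySem.List.pySetD vc.1 x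
      (PySem.List.pySetD (PySem.List.pyGetD vc.1 x []) y counter), counter)
  else vc

def pvVC (n : Int) : List (List Int) × Int :=
  (PySem.List.pyRange 0 n 1).foldl (fun vc b => (PySem.List.pyRange 0 n 1).foldl (pvCell n b) vc)
    (pvV0 n, 0)

def pvInvA (n : Int) : PySem.Dict Int (Int × Int) :=
  (PySem.List.pyRange 0 n 1).foldl (fun inv x =>
    (PySem.List.pyRange 0 n 1).foldl (fun (inv : PySem.Dict Int (Int × Int)) y =>
      if PySem.List.pyGetD (PySem.List.pyGetD (pvVC n).1 x []) y 0 > 0 then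
        inv.insert (PySem.List.pyGetD (PySem.List.pyGetD (pvVC n).1 x []) y 0) (x, y)
      else inv) inv) PySem.Dict.empty

def pvInvB (n : Int) : PySem.Dict Int (Int × Int) :=
  (PySem.List.pyRange 0 n 1).foldl (fun inv x =>
    (PySem.List.pyRange 0 (n - x) 1).foldl (fun (inv : PySem.Dict Int (Int × Int)) y =>
      let s := x + y
      inv.insert (PySem.Int.floordiv (s * (s + 1)) 2 + x + 1) (x, y)) inv) PySem.Dict.empty

lemma A_eq (max_n : Int) :
    build_point_maps max_n =
      ((PySem.List.pyRange 1 (max_n + 1) 1).foldl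
        (fun maps n => maps.insert n (pvInvA n).items)
        (PySem.Dict.empty : PySem.Dict Int (List (Int × Int × Int)))).items := rfl

lemma B_eq (max_n : Int) :
    build_point_maps_alt max_n =
      ((PySem.List.pyRange 1 (max_n + 1) 1).foldl
        (fun maps n => maps.insert n (pvInvB n).items)
        (PySem.Dict.empty : PySem.Dict Int (List (Int × Int × Int)))).items := rfl

lemma pvV0_shape (N : Nat) : pvShape (pvV0 (N : Int)) N := by
  constructor
  · simp [pvV0, PySem.List.length_pyRange_one]
  · intro row hrow
    simp only [pvV0, List.mem_map] at hrow
    obtain ⟨a, _, rfl⟩ := hrow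
    simp [PySem.List.length_pyRange_one]

lemma pvV0_zero (N x y : Nat) (hx : x < N) (hy : y < N) :
    pvGetC (pvV0 (N : Int)) (x : Int) (y : Int) = 0 := by
  rw [pvGetC, pvV0, PySem.List.pyGetD_map_pyRange _ N x _ hx,
    PySem.List.pyGetD_map_pyRange _ N y _ hy]

lemma pvShape_set (M : List (List Int)) (N : Nat) (hsh : pvShape M N) (x y : Nat) (hx : x < N) (c : Int) :
    pvShape (PySem.List.pySetD M (x : Int)
      (PySem.List.pySetD (PySem.List.pyGetD M (x : Int) []) (y : Int) c)) N := by
  obtain ⟨hlen, hrows⟩ := hsh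
  have hxM : x < M.length := by omega
  constructor
  · simpa [PySem.List.pySetD_natCast] using hlen
  · intro row hrow
    simp only [PySem.List.pySetD_natCast] at hrow
    rcases List.mem_or_eq_of_mem_set hrow with h | h
    · exact hrows _ h
    · subst h
      rw [PySem.List.pyGetD_natCast, List.length_set, List.getD_eq_getElem M [] hxM]
      exact hrows _ (List.getElem_mem hxM)

lemma pvGetC_set (M : List (List Int)) (N : Nat) (hsh : pvShape M N) (x y : Nat)
    (hx : x < N) (hy : y < N) (c : Int) (x' y' : Nat) :
    pvGetC (PySem.List.pySetD M (x : Int)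
        (PySem.List.pySetD (PySem.List.pyGetD M (x : Int) []) (y : Int) c)) (x' : Int) (y' : Int) =
      if x' = x ∧ y' = y then c else pvGetC M (x' : Int) (y' : Int) := by
  obtain ⟨hlen, hrows⟩ := hsh
  have hxM : x < M.length := by omega
  have hget : M[x]?.getD [] = M[x] := by simp [List.getElem?_eq_getElem hxM]
  have hrowlen : M[x].length = N := hrows _ (List.getElem_mem hxM)
  simp only [pvGetC, PySem.List.pyGetD_natCast, PySem.List.pySetD_natCast,
    List.getD_eq_getElem?_getD, List.getElem?_set, hget]
  by_cases hxx : x' = x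
  · subst hxx
    by_cases hyy : y' = y
    · subst hyy
      simp [hxM, hrowlen, hy]
    · have hne : ¬ (y = y') := fun h => hyy h.symm
      simp [hxM, hyy, hne]
  · rw [if_neg (fun h => hxx h.symm), if_neg (by simp [hxx])]

lemma inner_partial (N b : Nat) (hb : b < N) (M : List (List Int)) (hsh : pvShape M N)
    (hcell : ∀ x y : Nat, x < N → y < N →
      pvGetC M (x : Int) (y : Int) = if x + y < b then pvTri (x + y) + x + 1 else 0)
    (j : Nat) (hj : j ≤ b + 1) :
    pvShape ((PySem.List.pyRange 0 (j : Int) 1).foldl (pvCell (N : Int) (b : Int)) (M, pvTri b)).1 N ∧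
    ((PySem.List.pyRange 0 (j : Int) 1).foldl (pvCell (N : Int) (b : Int)) (M, pvTri b)).2 = pvTri b + j ∧
    ∀ x y : Nat, x < N → y < N →
      pvGetC ((PySem.List.pyRange 0 (j : Int) 1).foldl (pvCell (N : Int) (b : Int)) (M, pvTri b)).1
          (x : Int) (y : Int) =
        if x + y < b ∨ (x + y = b ∧ x < j) then pvTri (x + y) + x + 1 else 0 := by
  induction j with
  | zero =>
    rw [show ((0 : Nat) : Int) = 0 from rfl, PySem.List.pyRange_one_eq_nil le_rfl]
    simp only [List.foldl_nil]
    refine ⟨hsh, by simp, ?_⟩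
    intro x y hx hy
    rw [hcell x y hx hy]
    have hiff : (x + y < b) ↔ (x + y < b ∨ (x + y = b ∧ x < 0)) := by omega
    exact if_congr hiff rfl rfl
  | succ j ih =>
    obtain ⟨ihs, ihc, ihcell⟩ := ih (by omega)
    have hjb : j ≤ b := by omega
    have hstep : (PySem.List.pyRange 0 ((j + 1 : Nat) : Int) 1) =
        PySem.List.pyRange 0 (j : Int) 1 ++ [(j : Int)] := by
      push_cast
      exact PySem.List.pyRange_one_succ_right (Int.natCast_nonneg j)
    rw [hstep, List.foldl_append, List.foldl_cons, List.foldl_nil]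
    set r := (PySem.List.pyRange 0 (j : Int) 1).foldl (pvCell (N : Int) (b : Int)) (M, pvTri b) with hr
    have hguard : (0 : Int) ≤ (b : Int) - (j : Int) ∧ ((b : Int) - (j : Int)) < (N : Int) := by omega
    have hcast : ((b : Int) - (j : Int)) = ((b - j : Nat) : Int) := by omega
    simp only [pvCell]
    rw [if_pos hguard, hcast]
    refine ⟨pvShape_set r.1 N ihs j (b - j) (by omega) _, ?_, ?_⟩
    · show r.2 + 1 = pvTri b + ((j + 1 : Nat) : Int)
      rw [ihc]; push_cast; ring
    · intro x y hx hy
      show pvGetC (PySem.List.pySetD r.1 (j : Int)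
        (PySem.List.pySetD (PySem.List.pyGetD r.1 (j : Int) []) ((b - j : Nat) : Int) (r.2 + 1)))
          (x : Int) (y : Int) = _
      rw [pvGetC_set r.1 N ihs j (b - j) (by omega) (by omega) _ x y]
      by_cases hxy : x = j ∧ y = b - j
      · obtain ⟨rfl, rfl⟩ := hxy
        rw [if_pos ⟨rfl, rfl⟩, if_pos (by omega)]
        have hb' : x + (b - x) = b := by omega
        rw [hb', ihc]
      · rw [if_neg hxy, ihcell x y hx hy]
        have hiff : (x + y < b ∨ (x + y = b ∧ x < j)) ↔
            (x + y < b ∨ (x + y = b ∧ x < j + 1)) := by omega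
        exact if_congr hiff rfl rfl

lemma diag_full (N b : Nat) (hb : b < N) (M : List (List Int)) (hsh : pvShape M N)
    (hcell : ∀ x y : Nat, x < N → y < N →
      pvGetC M (x : Int) (y : Int) = if x + y < b then pvTri (x + y) + x + 1 else 0) :
    pvShape ((PySem.List.pyRange 0 (N : Int) 1).foldl (pvCell (N : Int) (b : Int)) (M, pvTri b)).1 N ∧
    ((PySem.List.pyRange 0 (N : Int) 1).foldl (pvCell (N : Int) (b : Int)) (M, pvTri b)).2 = pvTri (b + 1) ∧
    ∀ x y : Nat, x < N → y < N →
      pvGetC ((PySem.List.pyRange 0 (N : Int) 1).foldl (pvCell (N : Int) (b : Int)) (M, pvTri b)).1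
          (x : Int) (y : Int) =
        if x + y < b + 1 then pvTri (x + y) + x + 1 else 0 := by
  have hsplit : PySem.List.pyRange 0 (N : Int) 1 =
      PySem.List.pyRange 0 ((b + 1 : Nat) : Int) 1 ++
        PySem.List.pyRange ((b + 1 : Nat) : Int) (N : Int) 1 :=
    PySem.List.pyRange_one_append 0 _ _ (by omega) (by omega)
  rw [hsplit, List.foldl_append]
  obtain ⟨ps, pc, pcell⟩ := inner_partial N b hb M hsh hcell (b + 1) le_rfl
  set r := (PySem.List.pyRange 0 ((b + 1 : Nat) : Int) 1).foldl (pvCell (N : Int) (b : Int))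
    (M, pvTri b) with hr
  have hid : (PySem.List.pyRange ((b + 1 : Nat) : Int) (N : Int) 1).foldl
      (pvCell (N : Int) (b : Int)) r = r := by
    have hnoop : ∀ (acc : List (List Int) × Int) (z : Int),
        z ∈ PySem.List.pyRange ((b + 1 : Nat) : Int) (N : Int) 1 →
        pvCell (N : Int) (b : Int) acc z = acc := by
      intro acc z hz
      rw [PySem.List.mem_pyRange_one] at hz
      simp only [pvCell]
      rw [if_neg (by omega)]
    rw [PySem.List.foldl_congr_mem _ _ (fun acc _ => acc) _ hnoop, PySem.List.foldl_ignore]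
  rw [hid]
  refine ⟨ps, ?_, ?_⟩
  · rw [pc]; simp [pvTri]
  · intro x y hx hy
    rw [pcell x y hx hy]
    have hiff : (x + y < b ∨ (x + y = b ∧ x < b + 1)) ↔ (x + y < b + 1) := by omega
    exact if_congr hiff rfl rfl

lemma vc_partial (N k : Nat) (hk : k ≤ N) :
    pvShape ((PySem.List.pyRange 0 (k : Int) 1).foldl
        (fun vc b => (PySem.List.pyRange 0 (N : Int) 1).foldl (pvCell (N : Int) b) vc)
        (pvV0 (N : Int), 0)).1 N ∧
    ((PySem.List.pyRange 0 (k : Int) 1).foldl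
        (fun vc b => (PySem.List.pyRange 0 (N : Int) 1).foldl (pvCell (N : Int) b) vc)
        (pvV0 (N : Int), 0)).2 = pvTri k ∧
    ∀ x y : Nat, x < N → y < N →
      pvGetC ((PySem.List.pyRange 0 (k : Int) 1).foldl
          (fun vc b => (PySem.List.pyRange 0 (N : Int) 1).foldl (pvCell (N : Int) b) vc)
          (pvV0 (N : Int), 0)).1 (x : Int) (y : Int) =
        if x + y < k then pvTri (x + y) + x + 1 else 0 := by
  induction k with
  | zero =>
    rw [show ((0 : Nat) : Int) = 0 from rfl, PySem.List.pyRange_one_eq_nil le_rfl]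
    simp only [List.foldl_nil]
    refine ⟨pvV0_shape N, by simp [pvTri], ?_⟩
    intro x y hx hy
    rw [pvV0_zero N x y hx hy, if_neg (by omega)]
  | succ k ih =>
    obtain ⟨ihs, ihc, ihcell⟩ := ih (by omega)
    have hstep : (PySem.List.pyRange 0 ((k + 1 : Nat) : Int) 1) =
        PySem.List.pyRange 0 (k : Int) 1 ++ [(k : Int)] := by
      push_cast
      exact PySem.List.pyRange_one_succ_right (Int.natCast_nonneg k)
    rw [hstep, List.foldl_append, List.foldl_cons, List.foldl_nil]
    set r := (PySem.List.pyRange 0 (k : Int) 1).foldl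
      (fun vc b => (PySem.List.pyRange 0 (N : Int) 1).foldl (pvCell (N : Int) b) vc)
      (pvV0 (N : Int), 0) with hr
    have hre : r = (r.1, pvTri k) := by rw [← ihc]
    rw [hre]
    exact diag_full N k (by omega) r.1 ihs ihcell

lemma vc_spec (N : Nat) :
    ∀ x y : Nat, x < N → y < N →
      pvGetC (pvVC (N : Int)).1 (x : Int) (y : Int) =
        if x + y < N then pvTri (x + y) + x + 1 else 0 := by
  exact (vc_partial N N le_rfl).2.2

lemma inner_inv_eq (N xN : Nat) (hxN : xN < N) (inv : PySem.Dict Int (Int × Int)) :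
    (PySem.List.pyRange 0 (N : Int) 1).foldl (fun (inv : PySem.Dict Int (Int × Int)) y =>
        if PySem.List.pyGetD (PySem.List.pyGetD (pvVC (N : Int)).1 ((xN : Nat) : Int) []) y 0 > 0 then
          inv.insert
            (PySem.List.pyGetD (PySem.List.pyGetD (pvVC (N : Int)).1 ((xN : Nat) : Int) []) y 0)
            (((xN : Nat) : Int), y)
        else inv) inv =
      (PySem.List.pyRange 0 ((N - xN : Nat) : Int) 1).foldl
        (fun (inv : PySem.Dict Int (Int × Int)) y =>
          let s := ((xN : Nat) : Int) + y
          inv.insert (PySem.Int.floordiv (s * (s + 1)) 2 + ((xN : Nat) : Int) + 1)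
            (((xN : Nat) : Int), y)) inv := by
  have hsplit : PySem.List.pyRange 0 (N : Int) 1 =
      PySem.List.pyRange 0 ((N - xN : Nat) : Int) 1 ++
        PySem.List.pyRange ((N - xN : Nat) : Int) (N : Int) 1 :=
    PySem.List.pyRange_one_append 0 _ _ (by omega) (by omega)
  rw [hsplit, List.foldl_append]
  have hnoop : ∀ (acc : PySem.Dict Int (Int × Int)) (y : Int),
      y ∈ PySem.List.pyRange ((N - xN : Nat) : Int) (N : Int) 1 →
      (if PySem.List.pyGetD (PySem.List.pyGetD (pvVC (N : Int)).1 ((xN : Nat) : Int) []) y 0 > 0 then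
          acc.insert
            (PySem.List.pyGetD (PySem.List.pyGetD (pvVC (N : Int)).1 ((xN : Nat) : Int) []) y 0)
            (((xN : Nat) : Int), y)
        else acc) = acc := by
    intro acc y hy
    rw [PySem.List.mem_pyRange_one] at hy
    have hyN : y.toNat < N := by omega
    have hge : ¬ (xN + y.toNat < N) := by omega
    rw [show y = ((y.toNat : Nat) : Int) from (by omega)]
    have h := vc_spec N xN y.toNat hxN hyN
    simp only [pvGetC] at h
    have h0 : PySem.List.pyGetD
        (PySem.List.pyGetD (pvVC (N : Int)).1 ((xN : Nat) : Int) []) ((y.toNat : Nat) : Int) 0 =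
        0 := by rw [h, if_neg hge]
    rw [h0]
    norm_num
  rw [PySem.List.foldl_congr_mem _ _ (fun acc _ => acc) _ hnoop, PySem.List.foldl_ignore]
  apply PySem.List.foldl_congr_mem
  intro acc y hy
  rw [PySem.List.mem_pyRange_one] at hy
  have hlt : xN + y.toNat < N := by omega
  rw [show y = ((y.toNat : Nat) : Int) from (by omega)]
  have h := vc_spec N xN y.toNat hxN (by omega)
  simp only [pvGetC] at h
  have hval : PySem.List.pyGetD
      (PySem.List.pyGetD (pvVC (N : Int)).1 ((xN : Nat) : Int) []) ((y.toNat : Nat) : Int) 0 =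
      pvTri (xN + y.toNat) + (xN : Int) + 1 := by rw [h, if_pos hlt]
  have hpos : pvTri (xN + y.toNat) + (xN : Int) + 1 > 0 := by
    have := pvTri_nonneg (xN + y.toNat)
    omega
  have hkey : pvTri (xN + y.toNat) + (xN : Int) + 1 =
      PySem.Int.floordiv ((((xN : Nat) : Int) + ((y.toNat : Nat) : Int)) *
        (((xN : Nat) : Int) + ((y.toNat : Nat) : Int) + 1)) 2 + ((xN : Nat) : Int) + 1 := by
    rw [pvTri_floordiv (xN + y.toNat)]
    push_cast
    ring_nf
  rw [hval, if_pos hpos, hkey]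

lemma invAB (n : Int) : pvInvA n = pvInvB n := by
  by_cases hn : n ≤ 0
  · rw [pvInvA, pvInvB, PySem.List.pyRange_one_eq_nil hn]
    rfl
  · rw [pvInvA, pvInvB, show n = ((n.toNat : Nat) : Int) from (by omega)]
    apply PySem.List.foldl_congr_mem
    intro inv x hx
    rw [PySem.List.mem_pyRange_one] at hx
    rw [show x = ((x.toNat : Nat) : Int) from (by omega),
      show ((n.toNat : Nat) : Int) - ((x.toNat : Nat) : Int) =
        ((n.toNat - x.toNat : Nat) : Int) from (by omega)]
    exact inner_inv_eq n.toNat x.toNat (by omega) inv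

-- ===== VERDICT (by name: the statement is the Claim_ definition above) =====
theorem build_point_maps_spec : Claim_equal_build_point_maps := by
  intro max_n _
  show build_point_maps max_n = build_point_maps_alt max_n
  rw [A_eq, B_eq]
  congr 1
  exact PySem.List.foldl_congr_mem _ _ _ _ (fun maps n _ => by rw [invAB])
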